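-- pv_equiv track=rewrite | github.com/Ozzey/github-word-writer | main.py | get_coordinates_for_word
-- ===== SOURCE A (Python) =====
-- import math
--
-- alphabet = {
--     "A": [[2], [1, 3], [1, 2, 3], [0, 1, 3, 4], [0, 4]],
--     "B": [[0, 1, 2, 3], [0, 3, 4], [0, 1, 2, 3], [0, 3, 4], [0, 1, 2, 3]],
--     "C": [[0, 1, 2, 3, 4], [0], [0], [0], [0, 1, 2, 3, 4]],
--     "D": [[0, 1], [0, 2], [0, 3], [0, 4], [0, 1, 2, 3, 4]],
--     "E": [[0, 1, 2, 3, 4], [0], [0, 1, 2, 3, 4], [0], [0, 1, 2, 3, 4]],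
--     "F": [[0, 1, 2, 3, 4], [0], [0, 1, 2, 3, 4], [0], [0]],
--     "G": [[0, 1, 2, 3, 4], [0], [0, 3, 4], [0, 4], [0, 1, 2, 3, 4]],
--     "H": [[0, 4], [0, 4], [0, 1, 2, 3, 4], [0, 4], [0, 4]],
--     "I": [[0, 1, 2], [1], [1], [1], [0, 1, 2]],
--     "J": [[4], [4], [4], [0, 4], [0, 1, 2, 3, 4]],
--     "K": [[0, 4], [0, 3], [0, 1, 2], [0, 3], [0, 4]],
--     "L": [[0], [0], [0], [0], [0, 1, 2, 3, 4]],
--     "M": [[0, 4], [0, 1, 3, 4], [0, 2, 4], [0, 4], [0, 4]],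
--     "N": [[0, 4], [0, 1, 4], [0, 2, 4], [0, 3, 4], [0, 4]],
--     "O": [[0, 1, 2, 3, 4], [0, 4], [0, 4], [0, 4], [0, 1, 2, 3, 4]],
--     "P": [[0, 1, 2, 3, 4], [0, 4], [0, 1, 2, 3, 4], [0], [0]],
--     "Q": [[0, 1, 2, 3, 4], [0, 4], [0, 4], [0, 4], [0, 1, 2, 3], [2, 3, 4]],
--     "R": [[0, 1, 2, 3, 4], [0, 4], [0, 1, 2, 3, 4], [0, 3], [0, 4]],
--     "S": [[1, 2, 3, 4], [0], [1, 2, 3], [4], [0, 1, 2, 3]],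
--     "T": [[0, 1, 2, 3, 4], [2], [2], [2], [2]],
--     "U": [[0, 4], [0, 4], [0, 4], [0, 4], [0, 1, 2, 3, 4]],
--     "V": [[0, 4], [0, 4], [1, 3], [1, 3], [2]],
--     "W": [[0, 4], [0, 4], [0, 2, 4], [0, 1, 3, 4], [0, 4]],
--     "X": [[0, 4], [1, 3], [2], [1, 3], [0, 4]],
--     "Y": [[0, 4], [1, 3], [2], [2], [2]],
--     "Z": [[0, 1, 2, 3, 4], [3], [2], [1], [0, 1, 2, 3, 4]],
--     "0": [[1, 2], [0, 3], [0, 3], [0, 3], [1, 2]],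
--     "1": [[0], [0], [0], [0], [0]],
--     "2": [[0, 1, 2], [3], [1, 2], [0], [1, 2, 3]],
--     "3": [[0, 1, 2], [3], [0, 1, 2], [3], [0, 1, 2]],
--     "4": [[0, 3], [0, 3], [0, 1, 2, 3], [3], [3]],
--     "5": [[0, 1, 2, 3], [0], [0, 1, 2], [3], [0, 1, 2]],
--     "6": [[1, 2, 3], [0], [0, 1, 2], [0, 3], [1, 2]],
--     "7": [[0, 1, 2, 3], [2], [2], [1], [1]],
--     "8": [[1, 2], [0, 3], [1, 2], [0, 3], [1, 2]],
--     "9": [[1, 2], [0, 3], [1, 2, 3], [3], [1, 2]],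
--     "^": [[0, 2, 3, 4], [0, 2], [0, 1, 2, 3, 4], [2, 4], [0, 1, 2, 4]],
--     " ": []
-- }
--
-- def letter_width(letter):
--     return 0 if len(letter) == 0 else max([max(row) for row in letter]) + 1
--
-- def get_coordinates_for_word(word):
--     width = 52
--     height = 7
--     space_width = 1
--
--     letter_widths = [letter_width(alphabet[letter]) for letter in word]
--     word_width = sum(letter_widths) + space_width * (len(word) - 1)
--     x_border = (width - word_width) // 2
--
--     if x_border <= 0:
--         raise Exception("word is too big")
--
--     coordinates = []
--     for i in range(0, len(word)):
--         letter_shift_x = x_border + sum(letter_widths[0:i]) + space_width * i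
--         letter_height = len(alphabet[word[i]])
--         letter_shift_y = math.ceil((height - letter_height) / 2)
--
--         if letter_shift_y <= 0:
--             raise Exception("letter is too big")
--
--         for dy in range(0, letter_height):
--             for dx in alphabet[word[i]][dy]:
--                 coordinates.append((letter_shift_x + dx, letter_shift_y + dy))
--     return coordinates
-- ===== SOURCE B (Python) =====
-- GLYPHS = {
--     'A': (5, [(2, 1), (1, 2), (3, 2), (1, 3), (2, 3), (3, 3), (0, 4), (1, 4), (3, 4), (4, 4), (0, 5), (4, 5)]),
--     'B': (5, [(0, 1), (1, 1), (2, 1), (3, 1), (0, 2), (3, 2), (4, 2), (0, 3), (1, 3), (2, 3), (3, 3), (0, 4), (3, 4), (4, 4), (0, 5), (1, 5), (2, 5), (3, 5)]),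
--     'C': (5, [(0, 1), (1, 1), (2, 1), (3, 1), (4, 1), (0, 2), (0, 3), (0, 4), (0, 5), (1, 5), (2, 5), (3, 5), (4, 5)]),
--     'D': (5, [(0, 1), (1, 1), (0, 2), (2, 2), (0, 3), (3, 3), (0, 4), (4, 4), (0, 5), (1, 5), (2, 5), (3, 5), (4, 5)]),
--     'E': (5, [(0, 1), (1, 1), (2, 1), (3, 1), (4, 1), (0, 2), (0, 3), (1, 3), (2, 3), (3, 3), (4, 3), (0, 4), (0, 5), (1, 5), (2, 5), (3, 5), (4, 5)]),
--     'F': (5, [(0, 1), (1, 1), (2, 1), (3, 1), (4, 1), (0, 2), (0, 3), (1, 3), (2, 3), (3, 3), (4, 3), (0, 4), (0, 5)]),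
--     'G': (5, [(0, 1), (1, 1), (2, 1), (3, 1), (4, 1), (0, 2), (0, 3), (3, 3), (4, 3), (0, 4), (4, 4), (0, 5), (1, 5), (2, 5), (3, 5), (4, 5)]),
--     'H': (5, [(0, 1), (4, 1), (0, 2), (4, 2), (0, 3), (1, 3), (2, 3), (3, 3), (4, 3), (0, 4), (4, 4), (0, 5), (4, 5)]),
--     'I': (3, [(0, 1), (1, 1), (2, 1), (1, 2), (1, 3), (1, 4), (0, 5), (1, 5), (2, 5)]),
--     'J': (5, [(4, 1), (4, 2), (4, 3), (0, 4), (4, 4), (0, 5), (1, 5), (2, 5), (3, 5), (4, 5)]),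
--     'K': (5, [(0, 1), (4, 1), (0, 2), (3, 2), (0, 3), (1, 3), (2, 3), (0, 4), (3, 4), (0, 5), (4, 5)]),
--     'L': (5, [(0, 1), (0, 2), (0, 3), (0, 4), (0, 5), (1, 5), (2, 5), (3, 5), (4, 5)]),
--     'M': (5, [(0, 1), (4, 1), (0, 2), (1, 2), (3, 2), (4, 2), (0, 3), (2, 3), (4, 3), (0, 4), (4, 4), (0, 5), (4, 5)]),
--     'N': (5, [(0, 1), (4, 1), (0, 2), (1, 2), (4, 2), (0, 3), (2, 3), (4, 3), (0, 4), (3, 4), (4, 4), (0, 5), (4, 5)]),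
--     'O': (5, [(0, 1), (1, 1), (2, 1), (3, 1), (4, 1), (0, 2), (4, 2), (0, 3), (4, 3), (0, 4), (4, 4), (0, 5), (1, 5), (2, 5), (3, 5), (4, 5)]),
--     'P': (5, [(0, 1), (1, 1), (2, 1), (3, 1), (4, 1), (0, 2), (4, 2), (0, 3), (1, 3), (2, 3), (3, 3), (4, 3), (0, 4), (0, 5)]),
--     'Q': (5, [(0, 1), (1, 1), (2, 1), (3, 1), (4, 1), (0, 2), (4, 2), (0, 3), (4, 3), (0, 4), (4, 4), (0, 5), (1, 5), (2, 5), (3, 5), (2, 6), (3, 6), (4, 6)]),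
--     'R': (5, [(0, 1), (1, 1), (2, 1), (3, 1), (4, 1), (0, 2), (4, 2), (0, 3), (1, 3), (2, 3), (3, 3), (4, 3), (0, 4), (3, 4), (0, 5), (4, 5)]),
--     'S': (5, [(1, 1), (2, 1), (3, 1), (4, 1), (0, 2), (1, 3), (2, 3), (3, 3), (4, 4), (0, 5), (1, 5), (2, 5), (3, 5)]),
--     'T': (5, [(0, 1), (1, 1), (2, 1), (3, 1), (4, 1), (2, 2), (2, 3), (2, 4), (2, 5)]),
--     'U': (5, [(0, 1), (4, 1), (0, 2), (4, 2), (0, 3), (4, 3), (0, 4), (4, 4), (0, 5), (1, 5), (2, 5), (3, 5), (4, 5)]),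
--     'V': (5, [(0, 1), (4, 1), (0, 2), (4, 2), (1, 3), (3, 3), (1, 4), (3, 4), (2, 5)]),
--     'W': (5, [(0, 1), (4, 1), (0, 2), (4, 2), (0, 3), (2, 3), (4, 3), (0, 4), (1, 4), (3, 4), (4, 4), (0, 5), (4, 5)]),
--     'X': (5, [(0, 1), (4, 1), (1, 2), (3, 2), (2, 3), (1, 4), (3, 4), (0, 5), (4, 5)]),
--     'Y': (5, [(0, 1), (4, 1), (1, 2), (3, 2), (2, 3), (2, 4), (2, 5)]),
--     'Z': (5, [(0, 1), (1, 1), (2, 1), (3, 1), (4, 1), (3, 2), (2, 3), (1, 4), (0, 5), (1, 5), (2, 5), (3, 5), (4, 5)]),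
--     '0': (4, [(1, 1), (2, 1), (0, 2), (3, 2), (0, 3), (3, 3), (0, 4), (3, 4), (1, 5), (2, 5)]),
--     '1': (1, [(0, 1), (0, 2), (0, 3), (0, 4), (0, 5)]),
--     '2': (4, [(0, 1), (1, 1), (2, 1), (3, 2), (1, 3), (2, 3), (0, 4), (1, 5), (2, 5), (3, 5)]),
--     '3': (4, [(0, 1), (1, 1), (2, 1), (3, 2), (0, 3), (1, 3), (2, 3), (3, 4), (0, 5), (1, 5), (2, 5)]),
--     '4': (4, [(0, 1), (3, 1), (0, 2), (3, 2), (0, 3), (1, 3), (2, 3), (3, 3), (3, 4), (3, 5)]),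
--     '5': (4, [(0, 1), (1, 1), (2, 1), (3, 1), (0, 2), (0, 3), (1, 3), (2, 3), (3, 4), (0, 5), (1, 5), (2, 5)]),
--     '6': (4, [(1, 1), (2, 1), (3, 1), (0, 2), (0, 3), (1, 3), (2, 3), (0, 4), (3, 4), (1, 5), (2, 5)]),
--     '7': (4, [(0, 1), (1, 1), (2, 1), (3, 1), (2, 2), (2, 3), (1, 4), (1, 5)]),
--     '8': (4, [(1, 1), (2, 1), (0, 2), (3, 2), (1, 3), (2, 3), (0, 4), (3, 4), (1, 5), (2, 5)]),
--     '9': (4, [(1, 1), (2, 1), (0, 2), (3, 2), (1, 3), (2, 3), (3, 3), (3, 4), (1, 5), (2, 5)]),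
--     '^': (5, [(0, 1), (2, 1), (3, 1), (4, 1), (0, 2), (2, 2), (0, 3), (1, 3), (2, 3), (3, 3), (4, 3), (2, 4), (4, 4), (0, 5), (1, 5), (2, 5), (4, 5)]),
--     ' ': (0, []),
-- }
--
-- def get_coordinates_for_word(word):
--     # Precompiled glyph table: width and absolute (dx, y) cells per character,
--     # so rendering is one fold threading a running x-offset.
--     glyphs = [GLYPHS[ch] for ch in word]
--     word_width = sum(w for w, _ in glyphs) + (len(word) - 1)
--     x_border = (52 - word_width) // 2
--     if x_border <= 0:
--         raise Exception("word is too big")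
--     coordinates = []
--     x = x_border
--     for w, cells in glyphs:
--         coordinates.extend((x + dx, y) for dx, y in cells)
--         x += w + 1
--     return coordinates
-- ===== Notes on version B (the rewrite author's own statement) =====
-- stated objective: alternative
-- what changed: B replaces A's row-grid recomputation (per-letter width, ceil y-shift and sum(letter_widths[0:i]) re-summed inside the loop) with a precompiled glyph table mapping each character to its width and absolute (dx, y) cell list, consumed in one fold threading a running x-offset.
import Mathlib
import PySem

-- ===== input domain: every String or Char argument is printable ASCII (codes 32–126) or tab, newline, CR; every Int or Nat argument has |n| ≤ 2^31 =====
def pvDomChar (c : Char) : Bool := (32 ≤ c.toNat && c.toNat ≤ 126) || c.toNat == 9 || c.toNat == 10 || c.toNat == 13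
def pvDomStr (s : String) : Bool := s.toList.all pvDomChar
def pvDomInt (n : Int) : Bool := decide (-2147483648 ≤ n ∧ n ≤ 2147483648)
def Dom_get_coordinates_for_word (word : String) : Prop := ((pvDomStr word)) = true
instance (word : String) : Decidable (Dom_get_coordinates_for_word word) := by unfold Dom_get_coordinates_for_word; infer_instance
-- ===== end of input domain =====

-- B replaces A's row-grid recomputation (per-letter width, ceil-shift and prefix re-summation
-- sum(letter_widths[0:i]) inside the loop) by a precompiled glyph table of widths and absolute
-- (dx, y) cells, consumed by one fold threading a running x-offset (objective: alternative).

-- ===== PORT A =====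
-- the module-level dict 'alphabet'
def gwAlphabet : PySem.Dict Char (List (List Int)) := PySem.Dict.mk [
  ('A', [[2], [1, 3], [1, 2, 3], [0, 1, 3, 4], [0, 4]]),
  ('B', [[0, 1, 2, 3], [0, 3, 4], [0, 1, 2, 3], [0, 3, 4], [0, 1, 2, 3]]),
  ('C', [[0, 1, 2, 3, 4], [0], [0], [0], [0, 1, 2, 3, 4]]),
  ('D', [[0, 1], [0, 2], [0, 3], [0, 4], [0, 1, 2, 3, 4]]),
  ('E', [[0, 1, 2, 3, 4], [0], [0, 1, 2, 3, 4], [0], [0, 1, 2, 3, 4]]),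
  ('F', [[0, 1, 2, 3, 4], [0], [0, 1, 2, 3, 4], [0], [0]]),
  ('G', [[0, 1, 2, 3, 4], [0], [0, 3, 4], [0, 4], [0, 1, 2, 3, 4]]),
  ('H', [[0, 4], [0, 4], [0, 1, 2, 3, 4], [0, 4], [0, 4]]),
  ('I', [[0, 1, 2], [1], [1], [1], [0, 1, 2]]),
  ('J', [[4], [4], [4], [0, 4], [0, 1, 2, 3, 4]]),
  ('K', [[0, 4], [0, 3], [0, 1, 2], [0, 3], [0, 4]]),
  ('L', [[0], [0], [0], [0], [0, 1, 2, 3, 4]]),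
  ('M', [[0, 4], [0, 1, 3, 4], [0, 2, 4], [0, 4], [0, 4]]),
  ('N', [[0, 4], [0, 1, 4], [0, 2, 4], [0, 3, 4], [0, 4]]),
  ('O', [[0, 1, 2, 3, 4], [0, 4], [0, 4], [0, 4], [0, 1, 2, 3, 4]]),
  ('P', [[0, 1, 2, 3, 4], [0, 4], [0, 1, 2, 3, 4], [0], [0]]),
  ('Q', [[0, 1, 2, 3, 4], [0, 4], [0, 4], [0, 4], [0, 1, 2, 3], [2, 3, 4]]),
  ('R', [[0, 1, 2, 3, 4], [0, 4], [0, 1, 2, 3, 4], [0, 3], [0, 4]]),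
  ('S', [[1, 2, 3, 4], [0], [1, 2, 3], [4], [0, 1, 2, 3]]),
  ('T', [[0, 1, 2, 3, 4], [2], [2], [2], [2]]),
  ('U', [[0, 4], [0, 4], [0, 4], [0, 4], [0, 1, 2, 3, 4]]),
  ('V', [[0, 4], [0, 4], [1, 3], [1, 3], [2]]),
  ('W', [[0, 4], [0, 4], [0, 2, 4], [0, 1, 3, 4], [0, 4]]),
  ('X', [[0, 4], [1, 3], [2], [1, 3], [0, 4]]),
  ('Y', [[0, 4], [1, 3], [2], [2], [2]]),
  ('Z', [[0, 1, 2, 3, 4], [3], [2], [1], [0, 1, 2, 3, 4]]),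
  ('0', [[1, 2], [0, 3], [0, 3], [0, 3], [1, 2]]),
  ('1', [[0], [0], [0], [0], [0]]),
  ('2', [[0, 1, 2], [3], [1, 2], [0], [1, 2, 3]]),
  ('3', [[0, 1, 2], [3], [0, 1, 2], [3], [0, 1, 2]]),
  ('4', [[0, 3], [0, 3], [0, 1, 2, 3], [3], [3]]),
  ('5', [[0, 1, 2, 3], [0], [0, 1, 2], [3], [0, 1, 2]]),
  ('6', [[1, 2, 3], [0], [0, 1, 2], [0, 3], [1, 2]]),
  ('7', [[0, 1, 2, 3], [2], [2], [1], [1]]),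
  ('8', [[1, 2], [0, 3], [1, 2], [0, 3], [1, 2]]),
  ('9', [[1, 2], [0, 3], [1, 2, 3], [3], [1, 2]]),
  ('^', [[0, 2, 3, 4], [0, 2], [0, 1, 2, 3, 4], [2, 4], [0, 1, 2, 4]]),
  (' ', [])
]

-- letter_width(letter); inner max(row) via max? with getD 0 — exact here since every row of the table is nonempty
def gw_letter_width (letter : List (List Int)) : Int :=
  if letter.length = 0 then 0
  else ((PySem.List.max? (letter.map (fun row => (PySem.List.max? row (fun v => v)).getD 0)) (fun v => v)).getD 0) + 1

-- A's inner nested loop: for dy in range(letter_height): for dx in alphabet[word[i]][dy]: append (x+dx, y+dy)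
def gw_emitA (x y : Int) (shape : List (List Int)) : List (Int × Int) :=
  (List.range shape.length).flatMap (fun dy =>
    (shape.getD dy []).map (fun dx => (x + dx, y + (dy : Int))))

def get_coordinates_for_word (word : String) : List (Int × Int) :=
  let letters := word.toList
  let letter_widths := letters.map (fun c => gw_letter_width ((gwAlphabet.get? c).getD []))
  let word_width := letter_widths.sum + 1 * ((letters.length : Int) - 1)
  let x_border := PySem.Int.floordiv (52 - word_width) 2
  if x_border ≤ 0 then []      -- Python raises Exception("word is too big") here (outside Pre_)
  else
    (List.range letters.length).foldl (fun coords i =>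
      let letter := (gwAlphabet.get? (letters.getD i ' ')).getD []   -- in-range index; lookups covered by Pre_
      let letter_shift_x := x_border + (letter_widths.take i).sum + 1 * (i : Int)
      let letter_shift_y := -(PySem.Int.floordiv ((letter.length : Int) - 7) 2)  -- math.ceil((7-h)/2)
      -- Python's "letter is too big" raise needs letter_shift_y ≤ 0, i.e. ≥ 7 rows: no alphabet entry has that
      coords ++ gw_emitA letter_shift_x letter_shift_y letter) []

-- ===== PORT B =====
-- Source B's precompiled GLYPHS table: per character its width and absolute (dx, y) cells
def gwGlyphs : PySem.Dict Char (Int × List (Int × Int)) := PySem.Dict.mk [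
  ('A', (5, [(2, 1), (1, 2), (3, 2), (1, 3), (2, 3), (3, 3), (0, 4), (1, 4), (3, 4), (4, 4), (0, 5), (4, 5)])),
  ('B', (5, [(0, 1), (1, 1), (2, 1), (3, 1), (0, 2), (3, 2), (4, 2), (0, 3), (1, 3), (2, 3), (3, 3), (0, 4), (3, 4), (4, 4), (0, 5), (1, 5), (2, 5), (3, 5)])),
  ('C', (5, [(0, 1), (1, 1), (2, 1), (3, 1), (4, 1), (0, 2), (0, 3), (0, 4), (0, 5), (1, 5), (2, 5), (3, 5), (4, 5)])),
  ('D', (5, [(0, 1), (1, 1), (0, 2), (2, 2), (0, 3), (3, 3), (0, 4), (4, 4), (0, 5), (1, 5), (2, 5), (3, 5), (4, 5)])),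
  ('E', (5, [(0, 1), (1, 1), (2, 1), (3, 1), (4, 1), (0, 2), (0, 3), (1, 3), (2, 3), (3, 3), (4, 3), (0, 4), (0, 5), (1, 5), (2, 5), (3, 5), (4, 5)])),
  ('F', (5, [(0, 1), (1, 1), (2, 1), (3, 1), (4, 1), (0, 2), (0, 3), (1, 3), (2, 3), (3, 3), (4, 3), (0, 4), (0, 5)])),
  ('G', (5, [(0, 1), (1, 1), (2, 1), (3, 1), (4, 1), (0, 2), (0, 3), (3, 3), (4, 3), (0, 4), (4, 4), (0, 5), (1, 5), (2, 5), (3, 5), (4, 5)])),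
  ('H', (5, [(0, 1), (4, 1), (0, 2), (4, 2), (0, 3), (1, 3), (2, 3), (3, 3), (4, 3), (0, 4), (4, 4), (0, 5), (4, 5)])),
  ('I', (3, [(0, 1), (1, 1), (2, 1), (1, 2), (1, 3), (1, 4), (0, 5), (1, 5), (2, 5)])),
  ('J', (5, [(4, 1), (4, 2), (4, 3), (0, 4), (4, 4), (0, 5), (1, 5), (2, 5), (3, 5), (4, 5)])),
  ('K', (5, [(0, 1), (4, 1), (0, 2), (3, 2), (0, 3), (1, 3), (2, 3), (0, 4), (3, 4), (0, 5), (4, 5)])),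
  ('L', (5, [(0, 1), (0, 2), (0, 3), (0, 4), (0, 5), (1, 5), (2, 5), (3, 5), (4, 5)])),
  ('M', (5, [(0, 1), (4, 1), (0, 2), (1, 2), (3, 2), (4, 2), (0, 3), (2, 3), (4, 3), (0, 4), (4, 4), (0, 5), (4, 5)])),
  ('N', (5, [(0, 1), (4, 1), (0, 2), (1, 2), (4, 2), (0, 3), (2, 3), (4, 3), (0, 4), (3, 4), (4, 4), (0, 5), (4, 5)])),
  ('O', (5, [(0, 1), (1, 1), (2, 1), (3, 1), (4, 1), (0, 2), (4, 2), (0, 3), (4, 3), (0, 4), (4, 4), (0, 5), (1, 5), (2, 5), (3, 5), (4, 5)])),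
  ('P', (5, [(0, 1), (1, 1), (2, 1), (3, 1), (4, 1), (0, 2), (4, 2), (0, 3), (1, 3), (2, 3), (3, 3), (4, 3), (0, 4), (0, 5)])),
  ('Q', (5, [(0, 1), (1, 1), (2, 1), (3, 1), (4, 1), (0, 2), (4, 2), (0, 3), (4, 3), (0, 4), (4, 4), (0, 5), (1, 5), (2, 5), (3, 5), (2, 6), (3, 6), (4, 6)])),
  ('R', (5, [(0, 1), (1, 1), (2, 1), (3, 1), (4, 1), (0, 2), (4, 2), (0, 3), (1, 3), (2, 3), (3, 3), (4, 3), (0, 4), (3, 4), (0, 5), (4, 5)])),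
  ('S', (5, [(1, 1), (2, 1), (3, 1), (4, 1), (0, 2), (1, 3), (2, 3), (3, 3), (4, 4), (0, 5), (1, 5), (2, 5), (3, 5)])),
  ('T', (5, [(0, 1), (1, 1), (2, 1), (3, 1), (4, 1), (2, 2), (2, 3), (2, 4), (2, 5)])),
  ('U', (5, [(0, 1), (4, 1), (0, 2), (4, 2), (0, 3), (4, 3), (0, 4), (4, 4), (0, 5), (1, 5), (2, 5), (3, 5), (4, 5)])),
  ('V', (5, [(0, 1), (4, 1), (0, 2), (4, 2), (1, 3), (3, 3), (1, 4), (3, 4), (2, 5)])),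
  ('W', (5, [(0, 1), (4, 1), (0, 2), (4, 2), (0, 3), (2, 3), (4, 3), (0, 4), (1, 4), (3, 4), (4, 4), (0, 5), (4, 5)])),
  ('X', (5, [(0, 1), (4, 1), (1, 2), (3, 2), (2, 3), (1, 4), (3, 4), (0, 5), (4, 5)])),
  ('Y', (5, [(0, 1), (4, 1), (1, 2), (3, 2), (2, 3), (2, 4), (2, 5)])),
  ('Z', (5, [(0, 1), (1, 1), (2, 1), (3, 1), (4, 1), (3, 2), (2, 3), (1, 4), (0, 5), (1, 5), (2, 5), (3, 5), (4, 5)])),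
  ('0', (4, [(1, 1), (2, 1), (0, 2), (3, 2), (0, 3), (3, 3), (0, 4), (3, 4), (1, 5), (2, 5)])),
  ('1', (1, [(0, 1), (0, 2), (0, 3), (0, 4), (0, 5)])),
  ('2', (4, [(0, 1), (1, 1), (2, 1), (3, 2), (1, 3), (2, 3), (0, 4), (1, 5), (2, 5), (3, 5)])),
  ('3', (4, [(0, 1), (1, 1), (2, 1), (3, 2), (0, 3), (1, 3), (2, 3), (3, 4), (0, 5), (1, 5), (2, 5)])),
  ('4', (4, [(0, 1), (3, 1), (0, 2), (3, 2), (0, 3), (1, 3), (2, 3), (3, 3), (3, 4), (3, 5)])),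
  ('5', (4, [(0, 1), (1, 1), (2, 1), (3, 1), (0, 2), (0, 3), (1, 3), (2, 3), (3, 4), (0, 5), (1, 5), (2, 5)])),
  ('6', (4, [(1, 1), (2, 1), (3, 1), (0, 2), (0, 3), (1, 3), (2, 3), (0, 4), (3, 4), (1, 5), (2, 5)])),
  ('7', (4, [(0, 1), (1, 1), (2, 1), (3, 1), (2, 2), (2, 3), (1, 4), (1, 5)])),
  ('8', (4, [(1, 1), (2, 1), (0, 2), (3, 2), (1, 3), (2, 3), (0, 4), (3, 4), (1, 5), (2, 5)])),
  ('9', (4, [(1, 1), (2, 1), (0, 2), (3, 2), (1, 3), (2, 3), (3, 3), (3, 4), (1, 5), (2, 5)])),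
  ('^', (5, [(0, 1), (2, 1), (3, 1), (4, 1), (0, 2), (2, 2), (0, 3), (1, 3), (2, 3), (3, 3), (4, 3), (2, 4), (4, 4), (0, 5), (1, 5), (2, 5), (4, 5)])),
  (' ', (0, []))
]

def get_coordinates_for_word_alt (word : String) : List (Int × Int) :=
  let glyphs := word.toList.map (fun c => (gwGlyphs.get? c).getD (0, []))
  let word_width := (glyphs.map (fun g => g.1)).sum + ((word.toList.length : Int) - 1)
  let x_border := PySem.Int.floordiv (52 - word_width) 2
  if x_border ≤ 0 then []      -- Python raises Exception("word is too big") here (outside Pre_)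
  else
    (glyphs.foldl (fun st g =>
      (st.1 + g.1 + 1, st.2 ++ g.2.map (fun p => (st.1 + p.1, p.2)))) (x_border, ([] : List (Int × Int)))).2

-- ===== PRECONDITION & SPEC =====
-- Pre_ excludes exactly the inputs where A raises: a character outside the alphabet (KeyError)
-- and words whose rendered width exceeds 50, where A raises Exception("word is too big").
def Pre_get_coordinates_for_word (word : String) : Prop :=
  (word.toList.all (fun c => (gwAlphabet.get? c).isSome) = true) ∧
  (word.toList.map (fun c => gw_letter_width ((gwAlphabet.get? c).getD []))).sum
    + (word.toList.length : Int) - 1 ≤ 50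

instance (word : String) : Decidable (Pre_get_coordinates_for_word word) := by
  unfold Pre_get_coordinates_for_word; infer_instance

def pvWitness_get_coordinates_for_word : String := "HI 2"

def Spec_get_coordinates_for_word (word : String) (out : List (Int × Int)) : Prop := out = get_coordinates_for_word_alt word
instance (word : String) (out : List (Int × Int)) : Decidable (Spec_get_coordinates_for_word word out) := by unfold Spec_get_coordinates_for_word; infer_instance

-- ===== CLAIM =====
def Claim_equal_get_coordinates_for_word : Prop := ∀ (word : String), Dom_get_coordinates_for_word word → Pre_get_coordinates_for_word word → Spec_get_coordinates_for_word word (get_coordinates_for_word word)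

-- ===== LEMMAS AND PROOFS =====

-- the cells A computes for one letter, with the y-shift baked in (proof-side bridge)
def gw_cells (s : List (List Int)) : List (Int × Int) :=
  (List.range s.length).flatMap (fun dy =>
    (s.getD dy []).map (fun dx => (dx, -(PySem.Int.floordiv ((s.length : Int) - 7) 2) + (dy : Int))))

-- B's table is exactly A's table precompiled entrywise
lemma gw_tbl_eq : gwGlyphs = PySem.Dict.mk
    (gwAlphabet.items.map (fun p => (p.1, (gw_letter_width p.2, gw_cells p.2)))) := by decide

lemma gw_get?_mk_map {α β : Type} (f : α → β) (l : List (Char × α)) (c : Char) :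
    (PySem.Dict.mk (l.map (fun p => (p.1, f p.2)))).get? c = ((PySem.Dict.mk l).get? c).map f := by
  induction l with
  | nil => rfl
  | cons p l ih =>
      obtain ⟨k, v⟩ := p
      simp only [List.map_cons, PySem.Dict.get?_mk_cons]
      split <;> simp [ih]

-- lookup bridge: B's glyph for c = (width, cells) of A's (missing char ↦ (0, []) on both sides)
lemma gw_glyph_eq (c : Char) :
    (gwGlyphs.get? c).getD (0, []) =
      ((gw_letter_width ((gwAlphabet.get? c).getD [])), gw_cells ((gwAlphabet.get? c).getD [])) := by
  rw [gw_tbl_eq]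
  have h := gw_get?_mk_map (fun s => (gw_letter_width s, gw_cells s)) gwAlphabet.items c
  have hitems : PySem.Dict.mk gwAlphabet.items = gwAlphabet := rfl
  rw [hitems] at h
  rw [h]
  cases gwAlphabet.get? c <;> simp [gw_letter_width, gw_cells]

-- shifting the cells of one letter = A's inner nested loop
lemma gw_cells_shift (x : Int) (s : List (List Int)) :
    (gw_cells s).map (fun p => (x + p.1, p.2))
      = gw_emitA x (-(PySem.Int.floordiv ((s.length : Int) - 7) 2)) s := by
  simp [gw_cells, gw_emitA, List.map_flatMap, List.map_map, Function.comp_def]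

-- B's running-offset fold, characterised as a flatMap with prefix sums
lemma gw_foldB (gs : List (Int × List (Int × Int))) :
    ∀ (x0 : Int) (cs0 : List (Int × Int)),
    (gs.foldl (fun st g =>
        (st.1 + g.1 + 1, st.2 ++ g.2.map (fun p => (st.1 + p.1, p.2)))) (x0, cs0)).2
    = cs0 ++ (List.range gs.length).flatMap (fun i =>
        ((gs.getD i (0, [])).2).map (fun p =>
          (x0 + ((gs.take i).map (fun g => g.1)).sum + (i : Int) + p.1, p.2))) := by
  induction gs with
  | nil => intro x0 cs0; simp
  | cons g gs ih =>
      intro x0 cs0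
      simp only [List.foldl_cons, List.length_cons, List.range_succ_eq_map, List.flatMap_cons,
        List.flatMap_map]
      rw [ih]
      simp only [List.getD_cons_zero, List.take_zero, List.map_nil, List.sum_nil,
        List.append_assoc]
      congr 2
      · simp
      · congr 1
        funext i
        simp only [List.getD_cons_succ, List.take_succ_cons, List.map_cons, List.sum_cons]
        congr 1
        funext p
        congr 2
        push_cast
        ring

lemma gw_flatMap_congr {α β : Type} (l : List α) (f g : α → List β)
    (h : ∀ a ∈ l, f a = g a) : l.flatMap f = l.flatMap g := by
  induction l with
  | nil => rfl
  | cons a l ih =>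
      simp only [List.flatMap_cons, h a List.mem_cons_self,
        ih (fun b hb => h b (List.mem_cons_of_mem _ hb))]

-- ===== VERDICT =====
theorem get_coordinates_for_word_spec : Claim_equal_get_coordinates_for_word := by
  intro word _ _
  show get_coordinates_for_word word = get_coordinates_for_word_alt word
  unfold get_coordinates_for_word get_coordinates_for_word_alt
  simp only [gw_glyph_eq, List.map_map, Function.comp_def]
  have hww : ((word.toList.map (fun c => gw_letter_width ((gwAlphabet.get? c).getD []))).sum
      + ((word.toList.length : Int) - 1))
      = (word.toList.map (fun c => gw_letter_width ((gwAlphabet.get? c).getD []))).sum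
      + 1 * ((word.toList.length : Int) - 1) := by ring
  rw [hww]
  split_ifs with hb
  · rfl
  · rw [PySem.List.foldl_append_eq_flatMap, gw_foldB]
    simp only [List.nil_append, List.length_map]
    apply gw_flatMap_congr
    intro i hi
    have hlt : i < word.toList.length := List.mem_range.mp hi
    have hgetD : (word.toList.map (fun c =>
        (gw_letter_width ((gwAlphabet.get? c).getD []), gw_cells ((gwAlphabet.get? c).getD [])))).getD i (0, [])
        = (gw_letter_width ((gwAlphabet.get? (word.toList.getD i ' ')).getD []),
           gw_cells ((gwAlphabet.get? (word.toList.getD i ' ')).getD [])) := by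
      rw [List.getD_eq_getElem _ _ (by simpa using hlt), List.getElem_map,
          List.getD_eq_getElem _ _ hlt]
    rw [hgetD]
    have hpref : (((word.toList.map (fun c =>
        (gw_letter_width ((gwAlphabet.get? c).getD []), gw_cells ((gwAlphabet.get? c).getD [])))).take i).map
          (fun g => g.1)).sum
        = ((word.toList.map (fun c => gw_letter_width ((gwAlphabet.get? c).getD []))).take i).sum := by
      rw [← List.map_take, ← List.map_take, List.map_map]
      rfl
    rw [hpref, ← gw_cells_shift]
    congr 1
    funext p
    congr 1
    ring
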